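-- pv_equiv track=rewrite | github.com/ajoer/Newswork-on-Wikipedia | code/revision_analysis.py | diff_counters
-- ===== SOURCE A (Python) =====
-- def diff_counters(curr, prev):
--
-- 	added = 0
-- 	removed = 0
-- 	for ck, cv in curr.items():
-- 		if ck in prev.keys():
--
-- 			if cv == prev[ck]: continue
--
-- 			diff = cv - prev[ck]
--
-- 			if diff > 0: added += diff
-- 			elif diff < 0: removed += diff
--
-- 		else:
-- 			added += cv
--
-- 	for pk, pv in prev.items():
-- 		if pk not in curr.keys(): removed -= pv
--
-- 	return added, removed
-- ===== SOURCE B (Python) =====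
-- def diff_counters(curr, prev):
--     common = curr.keys() & prev.keys()
--     only_curr = curr.keys() - prev.keys()
--     only_prev = prev.keys() - curr.keys()
--     added = sum(max(curr[k] - prev[k], 0) for k in common) + sum(curr[k] for k in only_curr)
--     removed = sum(min(curr[k] - prev[k], 0) for k in common) - sum(prev[k] for k in only_prev)
--     return added, removed
-- ===== Notes on version B (the rewrite author's own statement) =====
-- stated objective: alternative
-- what changed: Replaces A's two branching accumulation loops by a set-algebra decomposition: the key sets common / only-in-curr / only-in-prev are formed with set operations and each of the two results is one sum (max/min clamp for common keys, raw values for exclusive keys).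
import Mathlib
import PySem

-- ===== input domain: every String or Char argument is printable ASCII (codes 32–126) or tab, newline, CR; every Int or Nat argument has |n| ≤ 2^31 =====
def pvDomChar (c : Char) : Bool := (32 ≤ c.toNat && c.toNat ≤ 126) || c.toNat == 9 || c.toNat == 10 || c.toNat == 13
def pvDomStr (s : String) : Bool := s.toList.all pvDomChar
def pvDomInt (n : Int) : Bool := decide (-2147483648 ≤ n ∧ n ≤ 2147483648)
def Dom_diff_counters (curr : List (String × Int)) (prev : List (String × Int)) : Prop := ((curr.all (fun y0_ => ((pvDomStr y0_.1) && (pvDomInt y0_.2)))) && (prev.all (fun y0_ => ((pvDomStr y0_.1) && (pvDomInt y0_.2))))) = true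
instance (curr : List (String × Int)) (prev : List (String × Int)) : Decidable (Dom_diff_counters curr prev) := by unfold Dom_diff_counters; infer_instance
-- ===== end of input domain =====

-- B replaces A's per-key branching loops by set-algebra over the key sets (common / only-curr /
-- only-prev) with one sum per group; objective: simpler/alternative decomposition, same O(n·m) on lists.

-- ===== PORT A =====
-- first-match lookup on an association list = Python dict lookup d[k] (exact: Pre_ requires unique keys)
def pvLookup? (d : List (String × Int)) (k : String) : Option Int :=
  match d with
  | [] => none
  | (k', v) :: rest => if k' = k then some v else pvLookup? rest k

def diff_counters (curr : List (String × Int)) (prev : List (String × Int)) : Int × Int :=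
  -- for ck, cv in curr.items(): …
  let ar := curr.foldl (fun (ar : Int × Int) (c : String × Int) =>
      match pvLookup? prev c.1 with           -- 'if ck in prev.keys()' + the prev[ck] lookups
      | some pv =>
        if c.2 = pv then ar                   -- continue
        else
          let diff := c.2 - pv
          if diff > 0 then (ar.1 + diff, ar.2)
          else if diff < 0 then (ar.1, ar.2 + diff)
          else ar
      | none => (ar.1 + c.2, ar.2)) (0, 0)
  -- for pk, pv in prev.items(): if pk not in curr.keys(): removed -= pv
  let removed := prev.foldl (fun (r : Int) (p : String × Int) =>
      if (pvLookup? curr p.1).isSome then r else r - p.2) ar.2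
  (ar.1, removed)

-- ===== PORT B =====
def diff_counters_alt (curr : List (String × Int)) (prev : List (String × Int)) : Int × Int :=
  let ckeys := curr.map Prod.fst
  let pkeys := prev.map Prod.fst
  -- key sets (Pre_ gives unique keys, so these filters are curr.keys() & / - prev.keys() etc.)
  let common := ckeys.filter (fun k => pkeys.contains k)
  let onlyC  := ckeys.filter (fun k => !pkeys.contains k)
  let onlyP  := pkeys.filter (fun k => !ckeys.contains k)
  let gc := fun k => (pvLookup? curr k).getD 0   -- curr[k] (key always present where used)
  let gp := fun k => (pvLookup? prev k).getD 0   -- prev[k]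
  let added := (common.map (fun k => max (gc k - gp k) 0)).sum + (onlyC.map gc).sum
  let removed := (common.map (fun k => min (gc k - gp k) 0)).sum - (onlyP.map gp).sum
  (added, removed)

-- ===== PRECONDITION & SPEC =====
-- Pre_ requires unique keys in each association list: the Python arguments are dicts, whose
-- association-list representation never has duplicate keys, so no input of A is lost.
def Pre_diff_counters (curr : List (String × Int)) (prev : List (String × Int)) : Prop :=
  (curr.map Prod.fst).Nodup ∧ (prev.map Prod.fst).Nodup
instance (curr : List (String × Int)) (prev : List (String × Int)) : Decidable (Pre_diff_counters curr prev) := by unfold Pre_diff_counters; infer_instance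

def pvWitness_diff_counters : (List (String × Int)) × (List (String × Int)) :=
  ([("a", 2), ("b", 1)], [("a", 5), ("c", 3)])

def Spec_diff_counters (curr : List (String × Int)) (prev : List (String × Int)) (out : Int × Int) : Prop := out = diff_counters_alt curr prev
instance (curr : List (String × Int)) (prev : List (String × Int)) (out : Int × Int) : Decidable (Spec_diff_counters curr prev out) := by unfold Spec_diff_counters; infer_instance

-- ===== CLAIM (what is proved, stated in full; the proofs are below) =====
def Claim_equal_diff_counters : Prop := ∀ (curr : List (String × Int)) (prev : List (String × Int)), Dom_diff_counters curr prev → Pre_diff_counters curr prev → Spec_diff_counters curr prev (diff_counters curr prev)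

-- ===== LEMMAS AND PROOFS =====

-- per-element contributions of A's first loop
def pvFa (prev : List (String × Int)) (c : String × Int) : Int :=
  match pvLookup? prev c.1 with
  | some pv => max (c.2 - pv) 0
  | none => c.2

def pvFr (prev : List (String × Int)) (c : String × Int) : Int :=
  match pvLookup? prev c.1 with
  | some pv => min (c.2 - pv) 0
  | none => 0

theorem pvStepA (prev : List (String × Int)) (ar : Int × Int) (c : String × Int) :
    (match pvLookup? prev c.1 with
      | some pv =>
        if c.2 = pv then ar
        else
          let diff := c.2 - pv
          if diff > 0 then (ar.1 + diff, ar.2)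
          else if diff < 0 then (ar.1, ar.2 + diff)
          else ar
      | none => (ar.1 + c.2, ar.2))
    = (ar.1 + pvFa prev c, ar.2 + pvFr prev c) := by
  unfold pvFa pvFr
  cases h : pvLookup? prev c.1 with
  | none => simp
  | some pv =>
    by_cases he : c.2 = pv
    · simp [he]
    · simp only [he, if_false]
      by_cases h1 : c.2 - pv > 0
      · simp only [h1, if_pos]
        have : max (c.2 - pv) 0 = c.2 - pv := by omega
        have h2 : min (c.2 - pv) 0 = 0 := by omega
        simp [this, h2]
      · have h1' : c.2 - pv < 0 := by omega
        simp only [h1, if_neg, h1', if_pos, if_false]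
        have : max (c.2 - pv) 0 = 0 := by omega
        have h2 : min (c.2 - pv) 0 = c.2 - pv := by omega
        simp [this, h2]

theorem pvFoldA (prev : List (String × Int)) (curr : List (String × Int)) (a r : Int) :
    curr.foldl (fun (ar : Int × Int) (c : String × Int) =>
      match pvLookup? prev c.1 with
      | some pv =>
        if c.2 = pv then ar
        else
          let diff := c.2 - pv
          if diff > 0 then (ar.1 + diff, ar.2)
          else if diff < 0 then (ar.1, ar.2 + diff)
          else ar
      | none => (ar.1 + c.2, ar.2)) (a, r)
    = (a + (curr.map (pvFa prev)).sum, r + (curr.map (pvFr prev)).sum) := by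
  induction curr generalizing a r with
  | nil => simp
  | cons c rest ih =>
    simp only [List.foldl_cons, List.map_cons, List.sum_cons]
    rw [pvStepA]
    rw [ih]
    simp only [Prod.mk.injEq]
    constructor <;> ring

theorem pvFoldP (curr : List (String × Int)) (prev : List (String × Int)) (r : Int) :
    prev.foldl (fun (r : Int) (p : String × Int) =>
      if (pvLookup? curr p.1).isSome then r else r - p.2) r
    = r - ((prev.filter (fun p => !(pvLookup? curr p.1).isSome)).map Prod.snd).sum := by
  induction prev generalizing r with
  | nil => simp
  | cons p rest ih =>
    simp only [List.foldl_cons, List.filter_cons]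
    cases h : (pvLookup? curr p.1).isSome with
    | true => simp only [h, if_pos]; rw [ih]; simp [h]
    | false => simp only [h, if_neg, Bool.false_eq_true, not_false_iff]; rw [ih]; simp [h]; ring

theorem pvLookup_isSome_eq_contains (d : List (String × Int)) (k : String) :
    (pvLookup? d k).isSome = (d.map Prod.fst).contains k := by
  induction d with
  | nil => simp [pvLookup?]
  | cons p rest ih =>
    simp only [pvLookup?, List.map_cons, List.contains_cons]
    by_cases h : p.1 = k
    · simp [h]
    · simp [h, ih, beq_iff_eq, Ne.symm h]

theorem pvLookup_eq_of_mem (d : List (String × Int)) (k : String) (v : Int)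
    (hm : (k, v) ∈ d) (hnd : (d.map Prod.fst).Nodup) : pvLookup? d k = some v := by
  induction d with
  | nil => simp at hm
  | cons p rest ih =>
    simp only [List.map_cons, List.nodup_cons] at hnd
    rcases List.mem_cons.mp hm with h | h
    · rw [← h]; simp [pvLookup?]
    · have hk : p.1 ≠ k := by
        intro he
        exact hnd.1 (he ▸ (List.mem_map.mpr ⟨(k, v), h, rfl⟩))
      simp only [pvLookup?, hk, if_neg, if_false]
      exact ih h hnd.2

-- generic split of a sum over an if into the two filtered sums
theorem pvSumSplit {α : Type} (l : List α) (q : α → Bool) (f g : α → Int) :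
    (l.map (fun x => if q x then f x else g x)).sum
    = ((l.filter q).map f).sum + ((l.filter (fun x => !q x)).map g).sum := by
  induction l with
  | nil => simp
  | cons x rest ih =>
    simp only [List.map_cons, List.sum_cons, List.filter_cons]
    cases h : q x <;> simp [h, ih] <;> ring

-- pull a filter+map over keys back to a filter+map over the pairs
theorem pvKeysFilterMap (l : List (String × Int)) (q : String → Bool) (F : String → Int) :
    (((l.map Prod.fst).filter q).map F).sum
    = ((l.filter (fun c => q c.1)).map (fun c => F c.1)).sum := by
  induction l with
  | nil => simp
  | cons c rest ih =>
    simp only [List.map_cons, List.filter_cons]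
    cases h : q c.1 <;> simp [h, ih]

theorem pvFa_eq (prev : List (String × Int)) (c : String × Int) :
    pvFa prev c = if ((pvLookup? prev c.1).isSome)
      then max (c.2 - (pvLookup? prev c.1).getD 0) 0 else c.2 := by
  unfold pvFa; cases h : pvLookup? prev c.1 <;> simp [h]

theorem pvFr_eq (prev : List (String × Int)) (c : String × Int) :
    pvFr prev c = if ((pvLookup? prev c.1).isSome)
      then min (c.2 - (pvLookup? prev c.1).getD 0) 0 else 0 := by
  unfold pvFr; cases h : pvLookup? prev c.1 <;> simp [h]

-- ===== VERDICT (by name: the statement is the Claim_ definition above) =====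
theorem diff_counters_spec : Claim_equal_diff_counters := by
  intro curr prev _ hpre
  obtain ⟨hc, hp⟩ := hpre
  unfold Spec_diff_counters diff_counters diff_counters_alt
  simp only []
  rw [pvFoldA, pvFoldP]
  have hgc : ∀ c ∈ curr, (pvLookup? curr c.1).getD 0 = c.2 := by
    intro c hm; rw [pvLookup_eq_of_mem curr c.1 c.2 hm hc]; rfl
  have hgp : ∀ p ∈ prev, (pvLookup? prev p.1).getD 0 = p.2 := by
    intro p hm; rw [pvLookup_eq_of_mem prev p.1 p.2 hm hp]; rfl
  simp only [Prod.mk.injEq, zero_add]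
  constructor
  · -- added
    rw [show (curr.map (pvFa prev)) = curr.map (fun c => if ((pvLookup? prev c.1).isSome)
        then max (c.2 - (pvLookup? prev c.1).getD 0) 0 else c.2) from
      List.map_congr_left (fun c _ => pvFa_eq prev c)]
    rw [pvSumSplit]
    rw [pvKeysFilterMap, pvKeysFilterMap]
    have e1 : (curr.filter (fun c => (prev.map Prod.fst).contains c.1))
        = curr.filter (fun c => (pvLookup? prev c.1).isSome) := by
      apply List.filter_congr; intro c _; rw [pvLookup_isSome_eq_contains]
    have e2 : (curr.filter (fun c => !(prev.map Prod.fst).contains c.1))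
        = curr.filter (fun c => !(pvLookup? prev c.1).isSome) := by
      apply List.filter_congr; intro c _; rw [pvLookup_isSome_eq_contains]
    rw [e1, e2]
    congr 1
    · apply congrArg; apply List.map_congr_left
      intro c hm
      rw [hgc c (List.mem_of_mem_filter hm)]
    · apply congrArg; apply List.map_congr_left
      intro c hm
      rw [hgc c (List.mem_of_mem_filter hm)]
  · -- removed
    rw [show (curr.map (pvFr prev)) = curr.map (fun c => if ((pvLookup? prev c.1).isSome)
        then min (c.2 - (pvLookup? prev c.1).getD 0) 0 else 0) from
      List.map_congr_left (fun c _ => pvFr_eq prev c)]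
    rw [pvSumSplit]
    rw [pvKeysFilterMap, pvKeysFilterMap]
    have e1 : (curr.filter (fun c => (prev.map Prod.fst).contains c.1))
        = curr.filter (fun c => (pvLookup? prev c.1).isSome) := by
      apply List.filter_congr; intro c _; rw [pvLookup_isSome_eq_contains]
    rw [e1]
    have e3 : (prev.filter (fun p => !(curr.map Prod.fst).contains p.1))
        = prev.filter (fun p => !(pvLookup? curr p.1).isSome) := by
      apply List.filter_congr; intro p _; rw [pvLookup_isSome_eq_contains]
    rw [e3]
    have z : ((curr.filter (fun c => !(pvLookup? prev c.1).isSome)).map (fun _ => (0:Int))).sum = 0 := by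
      simp
    rw [z, add_zero]
    congr 1
    · apply congrArg; apply List.map_congr_left
      intro c hm
      rw [hgc c (List.mem_of_mem_filter hm)]
    · apply congrArg; apply List.map_congr_left
      intro p hm
      exact (hgp p (List.mem_of_mem_filter hm)).symm
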